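-- pv_equiv track=rewrite | github.com/yhilmare/SC3-Algorithm | src/kmeanslib/KMeansEvaluation.py | scanAllTheListB
-- ===== SOURCE A (Python) =====
-- def getClassifyResult(instName, resultDict):
--     for item in resultDict.items():
--         if instName in item[1]:
--             return item[0]
--
-- def getClassifyTest(instName, testDict):
--     for item in testDict.items():
--         if instName in item[1]:
--             return item[0]
--
-- def scanAllTheListB(lst, resultDict, testDict):
--     result = set()
--     for i in range(0, len(lst)):
--         inst1 = lst[i]
--         for j in range(i + 1, len(lst)):
--             inst2 = lst[j]
--             if getClassifyResult(inst1, resultDict) == getClassifyResult(inst2, resultDict) and getClassifyTest(inst1, testDict) != getClassifyTest(inst2, testDict):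
--                 result.add((inst1, inst2))
--     return result
-- ===== SOURCE B (Python) =====
-- def scanAllTheListB(lst, resultDict, testDict):
--     rmap = {}
--     for key, members in resultDict.items():
--         for m in members:
--             if m not in rmap:
--                 rmap[m] = key
--     tmap = {}
--     for key, members in testDict.items():
--         for m in members:
--             if m not in tmap:
--                 tmap[m] = key
--     # bucket the instances (in list order) by predicted class, tagging each with its true class
--     groups = {}
--     for x in lst:
--         groups.setdefault(rmap.get(x), []).append((x, tmap.get(x)))
--     # sweep the list: pop each instance from the front of its own bucket and pair it
--     # with the remaining (later) members of that bucket whose true class differs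
--     result = set()
--     for x in lst:
--         g = groups[rmap.get(x)]
--         _, tx = g.pop(0)
--         for y, ty in g:
--             if ty != tx:
--                 result.add((x, y))
--     return result
-- ===== Notes on version B (the rewrite author's own statement) =====
-- stated objective: faster
-- what changed: B buckets the instances by predicted class in one pass (tagging each with its true class) and then sweeps the list, popping each instance from its bucket and pairing it only with the later members of the same bucket whose true class differs, so cross-class pairs are never visited and no per-pair dict scans occur, instead of A's all-pairs double loop that rescans both dicts for every pair.
import Mathlib
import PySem

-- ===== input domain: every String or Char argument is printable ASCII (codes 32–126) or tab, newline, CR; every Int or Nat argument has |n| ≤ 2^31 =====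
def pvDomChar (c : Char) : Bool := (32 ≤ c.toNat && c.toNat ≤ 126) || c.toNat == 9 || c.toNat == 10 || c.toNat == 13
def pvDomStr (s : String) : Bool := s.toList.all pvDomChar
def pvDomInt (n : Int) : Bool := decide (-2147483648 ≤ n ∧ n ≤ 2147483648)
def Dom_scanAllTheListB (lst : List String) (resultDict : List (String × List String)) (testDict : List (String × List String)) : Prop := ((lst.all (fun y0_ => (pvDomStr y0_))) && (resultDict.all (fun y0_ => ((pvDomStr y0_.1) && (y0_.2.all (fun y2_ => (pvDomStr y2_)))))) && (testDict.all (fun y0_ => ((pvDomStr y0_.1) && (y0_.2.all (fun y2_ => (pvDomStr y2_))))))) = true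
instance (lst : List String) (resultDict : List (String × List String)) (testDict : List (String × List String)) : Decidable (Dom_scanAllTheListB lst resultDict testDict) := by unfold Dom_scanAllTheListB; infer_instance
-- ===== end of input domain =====

-- B buckets instances by predicted class once and sweeps the list pairing each instance only with later same-bucket members of different true class; A's all-pairs loop with per-pair dict rescans disappears.


-- ===== PORT A =====
-- the dict parameters are assoc lists; the Python functions receive actual dicts, so .items is that of Dict.ofList
def pvClassify (instName : String) (items : List (String × List String)) : Option String :=
  match items with
  | [] => none
  | item :: rest => if item.2.contains instName then some item.1 else pvClassify instName rest

def getClassifyResultP (instName : String) (resultDict : List (String × List String)) : Option String :=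
  pvClassify instName (PySem.Dict.ofList resultDict).items

def getClassifyTestP (instName : String) (testDict : List (String × List String)) : Option String :=
  pvClassify instName (PySem.Dict.ofList testDict).items

def scanAllTheListB (lst : List String) (resultDict : List (String × List String)) (testDict : List (String × List String)) : List (String × String) :=
  (PySem.List.pyRange 0 (lst.length : Int) 1).foldl
    (fun result i =>
      (PySem.List.pyRange (i + 1) (lst.length : Int) 1).foldl
        (fun result j =>
          if getClassifyResultP (PySem.List.pyGetD lst i "") resultDict == getClassifyResultP (PySem.List.pyGetD lst j "") resultDict
              && !(getClassifyTestP (PySem.List.pyGetD lst i "") testDict == getClassifyTestP (PySem.List.pyGetD lst j "") testDict)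
          then PySem.Set.add result (PySem.List.pyGetD lst i "", PySem.List.pyGetD lst j "") else result)
        result)
    PySem.Set.empty

-- ===== PORT B =====
-- 'if m not in rmap: rmap[m] = key' over the dict items (earlier bindings win)
def pvBuildMap (d : List (String × List String)) : PySem.Dict String String :=
  (PySem.Dict.ofList d).items.foldl
    (fun m kv => kv.2.foldl (fun m' s => if m'.contains s then m' else m'.insert s kv.1) m)
    PySem.Dict.empty

-- groups.setdefault(rmap.get(x), []).append((x, tmap.get(x)))
def pvGroups (rmap tmap : PySem.Dict String String) (lst : List String) :
    PySem.Dict (Option String) (List (String × Option String)) :=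
  lst.foldl
    (fun g x => PySem.Dict.modify g (rmap.get? x) [] (fun l => l ++ [(x, tmap.get? x)]))
    PySem.Dict.empty

-- the sweep: pop x from the front of its bucket, pair it with the remaining members of different true class.
-- 'groups[rmap.get(x)]' and '.pop(0)' never fail: every element of lst was appended in the build pass and is
-- popped exactly once, so the key is present and the bucket non-empty; the [] branch is an unreachable total-form guard.
def pvSweep (rmap tmap : PySem.Dict String String) :
    List String → PySem.Dict (Option String) (List (String × Option String)) →
    PySem.Set (String × String) → PySem.Set (String × String)
  | [], _, res => res
  | x :: rest, g, res =>
      match (g.get? (rmap.get? x)).getD [] with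
      | [] => res
      | (_, tx) :: gtail =>
          pvSweep rmap tmap rest (g.insert (rmap.get? x) gtail)
            (gtail.foldl (fun r p => if !(p.2 == tx) then PySem.Set.add r (x, p.1) else r) res)

def scanAllTheListB_alt (lst : List String) (resultDict : List (String × List String)) (testDict : List (String × List String)) : List (String × String) :=
  let rmap := pvBuildMap resultDict
  let tmap := pvBuildMap testDict
  pvSweep rmap tmap lst (pvGroups rmap tmap lst) PySem.Set.empty

-- ===== PRECONDITION & SPEC =====
def Spec_scanAllTheListB (lst : List String) (resultDict : List (String × List String)) (testDict : List (String × List String)) (out : List (String × String)) : Prop := out = scanAllTheListB_alt lst resultDict testDict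
instance (lst : List String) (resultDict : List (String × List String)) (testDict : List (String × List String)) (out : List (String × String)) : Decidable (Spec_scanAllTheListB lst resultDict testDict out) := by unfold Spec_scanAllTheListB; infer_instance

-- ===== CLAIM (what is proved, stated in full; the proofs are below) =====
def Claim_equal_scanAllTheListB : Prop := ∀ (lst : List String) (resultDict : List (String × List String)) (testDict : List (String × List String)), Dom_scanAllTheListB lst resultDict testDict → Spec_scanAllTheListB lst resultDict testDict (scanAllTheListB lst resultDict testDict)

-- ===== LEMMAS AND PROOFS =====

-- generic pair loop, parametrised by the pair condition (A's nested loops reduce to it)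
def pairsG (cond : String → String → Bool) : List String → PySem.Set (String × String) → PySem.Set (String × String)
  | [], res => res
  | x :: rest, res =>
      pairsG cond rest
        (rest.foldl (fun r y => if cond x y then PySem.Set.add r (x, y) else r) res)

-- the "setdefault" inner loop: earlier bindings win
theorem buildMap_inner (members : List String) (key : String) (m : PySem.Dict String String) (x : String) :
    (members.foldl (fun m' s => if m'.contains s then m' else m'.insert s key) m).get? x
      = (m.get? x).or (if members.contains x then some key else none) := by
  induction members generalizing m with
  | nil => simp
  | cons s rest ih =>
    simp only [List.foldl_cons]
    rw [ih]
    by_cases hx : x = s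
    · subst hx
      by_cases hc : m.contains x = true
      · have : (m.get? x).isSome := by rw [← PySem.Dict.contains_eq_isSome_get?]; exact hc
        simp [hc, Option.or_of_isSome this]
      · have hn : m.get? x = none := by
          cases h : m.get? x with
          | none => rfl
          | some v => rw [PySem.Dict.contains_eq_isSome_get?, h] at hc; simp at hc
        simp [hc, hn, PySem.Dict.get?_insert_self]
    · by_cases hc : m.contains s = true
      · simp [hc, hx]
      · simp [hc, PySem.Dict.get?_insert_of_ne _ _ hx, hx]

theorem buildMap_outer (items : List (String × List String)) (m : PySem.Dict String String) (x : String) :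
    (items.foldl (fun m kv => kv.2.foldl (fun m' s => if m'.contains s then m' else m'.insert s kv.1) m) m).get? x
      = (m.get? x).or (pvClassify x items) := by
  induction items generalizing m with
  | nil => simp [pvClassify]
  | cons kv rest ih =>
    simp only [List.foldl_cons]
    rw [ih, buildMap_inner]
    simp only [pvClassify]
    cases h : kv.2.contains x with
    | false => simp
    | true => cases m.get? x <;> simp

theorem buildMap_get? (d : List (String × List String)) (x : String) :
    (pvBuildMap d).get? x = pvClassify x (PySem.Dict.ofList d).items := by
  unfold pvBuildMap
  rw [buildMap_outer]
  simp

-- the build pass: each bucket holds exactly the same-predicted-class members, in list order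
theorem groups_getD (rmap tmap : PySem.Dict String String) (lst : List String)
    (g0 : PySem.Dict (Option String) (List (String × Option String))) (k : Option String) :
    ((lst.foldl (fun g x => PySem.Dict.modify g (rmap.get? x) [] (fun l => l ++ [(x, tmap.get? x)])) g0).get? k).getD []
      = (g0.get? k).getD [] ++ (lst.filter (fun y => rmap.get? y == k)).map (fun y => (y, tmap.get? y)) := by
  induction lst generalizing g0 with
  | nil => simp
  | cons x rest ih =>
    simp only [List.foldl_cons, List.filter_cons]
    rw [ih]
    by_cases hk : k = rmap.get? x
    · subst hk
      have h : (g0.modify (rmap.get? x) [] fun l => l ++ [(x, tmap.get? x)]).getD (rmap.get? x) []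
          = g0.getD (rmap.get? x) [] ++ [(x, tmap.get? x)] := PySem.Dict.getD_modify_self _ _ _ _
      simp only [PySem.Dict.getD] at h
      simp [h]
    · have hb : (rmap.get? x == k) = false := by simp [beq_eq_false_iff_ne]; exact fun h => hk h.symm
      have h : (g0.modify (rmap.get? x) [] fun l => l ++ [(x, tmap.get? x)]).getD k []
          = if k = rmap.get? x then g0.getD (rmap.get? x) [] ++ [(x, tmap.get? x)] else g0.getD k [] :=
        PySem.Dict.getD_modify _ _ _ _ _
      simp only [PySem.Dict.getD, hk, if_false] at h
      simp [hb, h]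

-- the inner sweep fold over a bucket tail = the conditional fold over the whole remaining list
theorem inner_fold (rmap tmap : PySem.Dict String String) (x : String) (rest : List String)
    (res : PySem.Set (String × String)) :
    ((rest.filter (fun y => rmap.get? y == rmap.get? x)).map (fun y => (y, tmap.get? y))).foldl
        (fun r p => if !(p.2 == tmap.get? x) then PySem.Set.add r (x, p.1) else r) res
      = rest.foldl (fun r y =>
          if rmap.get? x == rmap.get? y && !(tmap.get? x == tmap.get? y)
          then PySem.Set.add r (x, y) else r) res := by
  induction rest generalizing res with
  | nil => rfl
  | cons y rest ih =>
    simp only [List.filter_cons, List.foldl_cons]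
    by_cases hr : rmap.get? y = rmap.get? x
    · have h1 : (rmap.get? y == rmap.get? x) = true := by simp [hr]
      have h2 : (rmap.get? x == rmap.get? y) = true := by simp [hr]
      have h3 : (tmap.get? y == tmap.get? x) = (tmap.get? x == tmap.get? y) := by
        by_cases ht : tmap.get? y = tmap.get? x
        · simp [ht]
        · have : ¬ tmap.get? x = tmap.get? y := fun h => ht h.symm
          simp [ht, this]
      simp only [h1, h2, if_true, List.map_cons, List.foldl_cons, Bool.true_and, h3]
      exact ih _
    · have h1 : (rmap.get? y == rmap.get? x) = false := by simp [beq_eq_false_iff_ne, hr]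
      have h2 : (rmap.get? x == rmap.get? y) = false := by
        simp [beq_eq_false_iff_ne]; exact fun h => hr h.symm
      simp only [h1, h2, Bool.false_and]
      exact ih res

-- the sweep maintains the bucket invariant and computes the generic pair loop
theorem sweep_eq (rmap tmap : PySem.Dict String String) (rest : List String)
    (g : PySem.Dict (Option String) (List (String × Option String))) (res : PySem.Set (String × String))
    (hinv : ∀ k, (g.get? k).getD []
        = (rest.filter (fun y => rmap.get? y == k)).map (fun y => (y, tmap.get? y))) :
    pvSweep rmap tmap rest g res
      = pairsG (fun x y => rmap.get? x == rmap.get? y && !(tmap.get? x == tmap.get? y)) rest res := by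
  induction rest generalizing g res with
  | nil => simp [pvSweep, pairsG]
  | cons x rest ih =>
    have hx := hinv (rmap.get? x)
    simp only [List.filter_cons, beq_self_eq_true, if_true, List.map_cons] at hx
    simp only [pvSweep, hx]
    rw [pairsG, ← inner_fold rmap tmap x rest res]
    apply ih
    intro k
    by_cases hk : k = rmap.get? x
    · subst hk
      simp [PySem.Dict.get?_insert_self]
    · have hne : ¬ k = rmap.get? x := hk
      rw [PySem.Dict.get?_insert_of_ne _ _ hne, hinv k]
      have hb : (rmap.get? x == k) = false := by
        simp [beq_eq_false_iff_ne]; exact fun h => hk h.symm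
      simp [hb]

-- A's nested index loops compute pairsG over the suffix of lst
theorem A_loop (cond : String → String → Bool) (lst : List String) :
    ∀ (k : Nat), k ≤ lst.length → ∀ (res : PySem.Set (String × String)),
    (PySem.List.pyRange (k : Int) (lst.length : Int) 1).foldl
      (fun result i =>
        (PySem.List.pyRange (i + 1) (lst.length : Int) 1).foldl
          (fun result j =>
            if cond (PySem.List.pyGetD lst i "") (PySem.List.pyGetD lst j "")
            then PySem.Set.add result (PySem.List.pyGetD lst i "", PySem.List.pyGetD lst j "") else result)
          result)
      res
    = pairsG cond (lst.drop k) res := by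
  intro k
  induction hn : lst.length - k generalizing k with
  | zero =>
    intro hk res
    have hk' : k = lst.length := by omega
    subst hk'
    rw [PySem.List.pyRange_one_eq_nil (by omega)]
    simp [pairsG]
  | succ n ih =>
    intro hk res
    have hlt : k < lst.length := by omega
    rw [PySem.List.pyRange_one_cons (by exact_mod_cast hlt)]
    simp only [List.foldl_cons]
    have hcast : ((k : Int) + 1) = ((k + 1 : Nat) : Int) := by push_cast; ring
    rw [hcast]
    rw [ih (k + 1) (by omega) (by omega)]
    have hdrop : lst.drop k = lst[k] :: lst.drop (k + 1) := List.drop_eq_getElem_cons hlt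
    rw [hdrop]
    simp only [pairsG]
    congr 1
    have hget : PySem.List.pyGetD lst ((k : Nat) : Int) "" = lst[k] := by
      rw [PySem.List.pyGetD_natCast]; exact List.getD_eq_getElem lst "" hlt
    rw [PySem.List.foldl_pyRange_pyGetD' lst ""
      (fun r y => if cond (PySem.List.pyGetD lst ((k : Nat) : Int) "") y
                  then PySem.Set.add r (PySem.List.pyGetD lst ((k : Nat) : Int) "", y) else r) res (by omega)]
    rw [hget]
    norm_num

theorem pairsG_congr (c1 c2 : String → String → Bool) (h : ∀ x y, c1 x y = c2 x y)
    (xs : List String) (res : PySem.Set (String × String)) :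
    pairsG c1 xs res = pairsG c2 xs res := by
  have : c1 = c2 := funext fun x => funext fun y => h x y
  rw [this]

-- ===== VERDICT (by name: the statement is the Claim_ definition above) =====
theorem scanAllTheListB_spec : Claim_equal_scanAllTheListB := by
  intro lst resultDict testDict _
  unfold Spec_scanAllTheListB scanAllTheListB scanAllTheListB_alt
  have h0 : ((0 : Int)) = ((0 : Nat) : Int) := by norm_num
  rw [h0, A_loop (fun x y => getClassifyResultP x resultDict == getClassifyResultP y resultDict
        && !(getClassifyTestP x testDict == getClassifyTestP y testDict)) lst 0 (by omega) PySem.Set.empty]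
  simp only [List.drop_zero]
  rw [sweep_eq (pvBuildMap resultDict) (pvBuildMap testDict) lst (pvGroups _ _ lst) PySem.Set.empty
    (fun k => by unfold pvGroups; rw [groups_getD]; simp)]
  exact pairsG_congr _ _ (fun x y => by
    simp only [getClassifyResultP, getClassifyTestP, ← buildMap_get?]) lst PySem.Set.empty
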